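-- pv_equiv track=rewrite | github.com/ispope45/Script | TestDir/Project Euler/5.py | primeFactorsOfFactors
-- ===== SOURCE A (Python) =====
-- def primeFactorsOfFactors(n):
--     l = []
--     # Create a list of all factors
--     div = list(range(2,n+1))
--
--     while len(div) > 0:
--         # x takes the first value of the factors and remove it
--         try:
--             x = div.pop(0)
--         except:
--             pass
--         # We add this factor in the output list
--         l.append(x)
--         # We check the nexts factor by comparison to the actuals factors
--         i = 0
--         for i in range(len(div)):
--             if not div[i] % x:
--                 div[i] = int(div[i]/x)
--     return l
-- ===== SOURCE B (Python) =====
-- def primeFactorsOfFactors(n):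
--     # For each m in 2..n emit the prime p if m is a prime power p**k, else 1
--     # (this is exactly the sequence A's pop-and-divide process produces).
--     out = []
--     for m in range(2, n + 1):
--         p = 2
--         while p * p <= m and m % p != 0:
--             p += 1
--         if p * p > m:
--             p = m
--         q = m
--         while q % p == 0:
--             q //= p
--         out.append(p if q == 1 else 1)
--     return out
-- ===== Notes on version B (the rewrite author's own statement) =====
-- stated objective: faster
-- what changed: A repeatedly sweeps a shrinking mutable list of all numbers 2..n, popping the head and dividing later entries; B computes each output independently by trial division: the entry for m is its smallest prime factor if m is a prime power, else 1.
import Mathlib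
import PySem

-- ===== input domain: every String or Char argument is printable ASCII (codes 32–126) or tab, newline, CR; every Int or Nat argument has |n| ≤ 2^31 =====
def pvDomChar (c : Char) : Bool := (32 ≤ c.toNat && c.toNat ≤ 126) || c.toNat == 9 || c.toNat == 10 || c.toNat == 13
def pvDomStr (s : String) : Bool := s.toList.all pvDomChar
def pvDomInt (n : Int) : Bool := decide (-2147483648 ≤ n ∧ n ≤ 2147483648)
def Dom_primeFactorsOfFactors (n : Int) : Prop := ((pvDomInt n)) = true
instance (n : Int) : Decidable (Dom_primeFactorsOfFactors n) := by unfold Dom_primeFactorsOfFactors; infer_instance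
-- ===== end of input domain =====

-- B replaces A's quadratic pop-and-divide sweep over a shrinking list by an independent
-- per-element trial-division computation (prime base of a prime power, else 1); faster.

-- ===== PORT A =====
-- the inner `for i in range(len(div)): if not div[i] % x: div[i] = int(div[i]/x)`
-- rewrites each entry independently, i.e. maps over the list; the guard makes x divide
-- div[i] exactly (both positive), so `int(div[i]/x)` (float division, exact at these
-- magnitudes, truncated) equals floor division there.
def pvStepA (x : Int) (l : List Int) : List Int :=
  l.map (fun d => if PySem.Int.mod d x = 0 then PySem.Int.floordiv d x else d)

-- the while loop: pop the head (the try/except never fires: len(div) > 0 inside the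
-- loop), append it to the output, rewrite the rest
def pvLoopA : List Int → List Int
  | [] => []
  | x :: rest => x :: pvLoopA (pvStepA x rest)
termination_by l => l.length
decreasing_by simp [pvStepA]

def primeFactorsOfFactors (n : Int) : List Int :=
  pvLoopA (PySem.List.pyRange 2 (n + 1) 1)

-- ===== PORT B =====
-- `while p * p <= m and m % p != 0: p += 1`  (all values here are nonnegative, so the
-- helpers compute on Nat; results are cast back to Int)
def pvFindP (m p : Nat) : Nat :=
  if p * p ≤ m ∧ m % p ≠ 0 then pvFindP m (p + 1) else p
termination_by m + 1 - p
decreasing_by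
  rename_i h
  have hp : p ≤ m := by nlinarith [h.1]
  omega

-- `while q % p == 0: q //= p`; the extra guards 2 ≤ p and q ≠ 0 only make the
-- recursion terminate on junk arguments (B always has q ≥ 2 and p ≥ 2 here)
def pvStrip (q p : Nat) : Nat :=
  if 2 ≤ p ∧ q ≠ 0 ∧ q % p = 0 then pvStrip (q / p) p else q
termination_by q
decreasing_by
  rename_i h
  exact Nat.div_lt_self (Nat.pos_of_ne_zero h.2.1) (by omega)

-- one iteration of B's for-loop body (its m satisfies m ≥ 2, so .toNat below is exact)
def pvElemB (m : Nat) : Nat :=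
  let p0 := pvFindP m 2
  let p := if p0 * p0 > m then m else p0
  let q := pvStrip m p
  if q = 1 then p else 1

def primeFactorsOfFactors_alt (n : Int) : List Int :=
  (PySem.List.pyRange 2 (n + 1) 1).map (fun m => (pvElemB m.toNat : Int))

-- ===== PRECONDITION & SPEC =====
def Spec_primeFactorsOfFactors (n : Int) (out : List Int) : Prop := out = primeFactorsOfFactors_alt n
instance (n : Int) (out : List Int) : Decidable (Spec_primeFactorsOfFactors n out) := by unfold Spec_primeFactorsOfFactors; infer_instance

-- ===== CLAIM (what is proved, stated in full; the proofs are below) =====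
def Claim_equal_primeFactorsOfFactors : Prop := ∀ (n : Int), Dom_primeFactorsOfFactors n → Spec_primeFactorsOfFactors n (primeFactorsOfFactors n)

-- ===== LEMMAS AND PROOFS =====
-- Plan: A's loop, mirrored on Nat (pvLoopN), sends the list [F t (t+1), …, F t n] to
-- [F t (t+1), F (t+1) (t+2), …] where F t m := ∏_{p prime} p ^ (v_p(m) - log_p t) is the
-- closed form of an entry after the values 2..t have been popped (pvStep_closed, pvMain);
-- the popped value F (m-1) m is m's prime base if m is a prime power and 1 otherwise
-- (pvFF_pp / pvFF_not_pp), which is exactly what B's trial division computes (pvElemB_eq).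

def pvStepN (x : Nat) (l : List Nat) : List Nat :=
  l.map (fun d => if d % x = 0 then d / x else d)
def pvLoopN : List Nat → List Nat
  | [] => []
  | x :: rest => x :: pvLoopN (pvStepN x rest)
termination_by l => l.length
decreasing_by simp [pvStepN]
def pvFF (t m : Nat) : Nat :=
  ∏ p ∈ m.primeFactors, p ^ (m.factorization p - Nat.log p t)

lemma pvStepA_natCast (x : Nat) (l : List Nat) :
    pvStepA (x : Int) (l.map (fun d : Nat => (d : Int))) = (pvStepN x l).map (fun d : Nat => (d : Int)) := by
  rw [pvStepA, pvStepN, List.map_map, List.map_map]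
  apply List.map_congr_left
  intro d _
  simp only [Function.comp_apply]
  rw [PySem.Int.mod_natCast, PySem.Int.floordiv_natCast]
  by_cases h : d % x = 0
  · rw [if_pos (by exact_mod_cast h), if_pos h]
  · rw [if_neg (show ((d % x : Nat) : Int) ≠ 0 by exact_mod_cast h), if_neg h]

lemma pvLoopA_natCast (l : List Nat) :
    pvLoopA (l.map (fun d : Nat => (d : Int))) = (pvLoopN l).map (fun d : Nat => (d : Int)) := by
  induction hl : l.length using Nat.strong_induction_on generalizing l with
  | _ n ih =>
    cases l with
    | nil => simp [pvLoopA, pvLoopN]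
    | cons x rest =>
      rw [List.map_cons, pvLoopA, pvLoopN, pvStepA_natCast, List.map_cons]
      congr 1
      exact ih _ (by simp [pvStepN, ← hl]) _ rfl

lemma pvFF_pos {m : Nat} (_hm : m ≠ 0) (t : Nat) : 0 < pvFF t m := by
  apply Finset.prod_pos
  intro p hp
  exact pow_pos (Nat.Prime.pos (Nat.prime_of_mem_primeFactors hp)) _

lemma pvFF_factorization {m : Nat} (_hm : m ≠ 0) (t q : Nat) :
    (pvFF t m).factorization q = m.factorization q - Nat.log q t := by
  rw [pvFF, Nat.factorization_prod
    (fun p hp => (pow_pos (Nat.prime_of_mem_primeFactors hp).pos _).ne')]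
  rw [Finset.sum_congr rfl (fun p hp =>
    Nat.Prime.factorization_pow (Nat.prime_of_mem_primeFactors hp))]
  rw [Finsupp.finset_sum_apply]
  simp only [Finsupp.single_apply]
  rw [Finset.sum_ite_eq' m.primeFactors q]
  by_cases hq : q ∈ m.primeFactors
  · simp [hq]
  · have h0 : m.factorization q = 0 := by
      have := Nat.support_factorization m
      exact Finsupp.notMem_support_iff.mp (by rw [this]; exact hq)
    simp [hq, h0]

lemma pvFF_one {m : Nat} (hm : m ≠ 0) : pvFF 1 m = m := by
  rw [pvFF]
  simp only [Nat.log_one_right, Nat.sub_zero]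
  rw [← Nat.support_factorization, ← Finsupp.prod]
  exact Nat.prod_factorization_pow_eq_self hm

lemma pvLog_succ_of_pow {p t i : Nat} (hp : 2 ≤ p) (hi : 0 < i) (h : p ^ i = t + 1) :
    Nat.log p (t + 1) = Nat.log p t + 1 := by
  have hb : 1 < p := hp
  have l1 : Nat.log p (t + 1) = i := by rw [← h, Nat.log_pow hb]
  have hlt : p ^ (i - 1) < p ^ i := Nat.pow_lt_pow_right hb (by omega)
  have l2 : Nat.log p t = i - 1 := by
    apply Nat.log_eq_of_pow_le_of_lt_pow
    · omega
    · rw [show i - 1 + 1 = i by omega, h]; omega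
  omega

lemma pvLog_succ_of_not {p t : Nat} (hp : 2 ≤ p) (h : ∀ i, 0 < i → p ^ i ≠ t + 1) :
    Nat.log p (t + 1) = Nat.log p t := by
  have mono : Nat.log p t ≤ Nat.log p (t + 1) := Nat.log_mono_right (by omega)
  rcases Nat.eq_zero_or_pos (Nat.log p (t + 1)) with h0 | hpos
  · omega
  · have hle : p ^ (Nat.log p (t + 1)) ≤ t + 1 := Nat.pow_log_le_self p (by omega)
    have hne : p ^ (Nat.log p (t + 1)) ≠ t + 1 := h _ hpos
    have hp2 : 2 ≤ p ^ (Nat.log p (t + 1)) := by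
      calc 2 ≤ p := hp
      _ = p ^ 1 := (pow_one p).symm
      _ ≤ p ^ (Nat.log p (t + 1)) := Nat.pow_le_pow_right (by omega) hpos
    have : Nat.log p (t + 1) ≤ Nat.log p t :=
      (Nat.le_log_iff_pow_le hp (by omega)).mpr (by omega)
    omega

lemma pvFF_pp {p i : Nat} (hp : p.Prime) (hi : 0 < i) :
    pvFF (p ^ i - 1) (p ^ i) = p := by
  have hb : 1 < p := hp.one_lt
  have hpf : (p ^ i).primeFactors = {p} := by
    rw [Nat.primeFactors_pow _ (by omega)]
    exact Nat.Prime.primeFactors hp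
  have hfa : (p ^ i).factorization p = i := by
    rw [Nat.Prime.factorization_pow hp]; simp
  have hlt : p ^ (i - 1) < p ^ i := Nat.pow_lt_pow_right hb (by omega)
  have hlog : Nat.log p (p ^ i - 1) = i - 1 := by
    apply Nat.log_eq_of_pow_le_of_lt_pow
    · omega
    · rw [show i - 1 + 1 = i by omega]; omega
  rw [pvFF, hpf, Finset.prod_singleton, hfa, hlog,
    show i - (i - 1) = 1 by omega, pow_one]

lemma pvFF_not_pp {m : Nat} (hm : 2 ≤ m) (h : ¬ IsPrimePow m) :
    pvFF (m - 1) m = 1 := by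
  rw [pvFF]
  apply Finset.prod_eq_one
  intro p hp
  have hprime := Nat.prime_of_mem_primeFactors hp
  have hdvd : p ^ (m.factorization p) ∣ m := Nat.ordProj_dvd m p
  have hne : p ^ (m.factorization p) ≠ m := by
    intro he
    have hpos : 0 < m.factorization p :=
      Nat.Prime.factorization_pos_of_dvd hprime (by omega) (Nat.dvd_of_mem_primeFactors hp)
    exact h ((isPrimePow_nat_iff _).mpr ⟨p, m.factorization p, hprime, hpos, he⟩)
  have hlt : p ^ m.factorization p < m :=
    lt_of_le_of_ne (Nat.le_of_dvd (by omega) hdvd) hne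
  have hlog : m.factorization p ≤ Nat.log p (m - 1) :=
    (Nat.le_log_iff_pow_le hprime.one_lt (by omega)).mpr (by omega)
  simp [Nat.sub_eq_zero_of_le hlog]

lemma pvLog_succ_ne_base {r q i t : Nat} (hr : r.Prime) (hq : q.Prime) (hrq : r ≠ q)
    (_hi : 0 < i) (he : q ^ i = t + 1) : Nat.log r (t + 1) = Nat.log r t := by
  apply pvLog_succ_of_not hr.two_le
  intro j hj hc
  apply hrq
  have hd : r ∣ q ^ i := by
    rw [he, ← hc]
    exact dvd_pow_self r (by omega)
  exact (Nat.prime_dvd_prime_iff_eq hr hq).mp (hr.dvd_of_dvd_pow hd)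

lemma pvLog_succ_npp {r t : Nat} (hr : r.Prime) (hpp : ¬ IsPrimePow (t + 1)) :
    Nat.log r (t + 1) = Nat.log r t := by
  apply pvLog_succ_of_not hr.two_le
  intro j hj hc
  exact hpp ((isPrimePow_nat_iff _).mpr ⟨r, j, hr, hj, hc⟩)

lemma pvStep_closed {m t : Nat} (hm : m ≠ 0) (ht : 1 ≤ t) :
    (if pvFF t m % pvFF t (t + 1) = 0 then pvFF t m / pvFF t (t + 1) else pvFF t m)
      = pvFF (t + 1) m := by
  have hFFne : pvFF t m ≠ 0 := (pvFF_pos hm t).ne'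
  by_cases hpp : IsPrimePow (t + 1)
  · obtain ⟨q, i, hq, hi, he⟩ := (isPrimePow_nat_iff _).mp hpp
    have hx : pvFF t (t + 1) = q := by
      have h1 : t + 1 = q ^ i := he.symm
      have h2 : t = q ^ i - 1 := by omega
      rw [h1, h2]
      exact pvFF_pp hq hi
    rw [hx]
    by_cases hdvd : q ∣ pvFF t m
    · rw [if_pos ((Nat.mod_eq_zero_of_dvd hdvd))]
      have hfq : 1 ≤ m.factorization q - Nat.log q t := by
        have := (Nat.Prime.dvd_iff_one_le_factorization hq hFFne).mp hdvd
        rwa [pvFF_factorization hm] at this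
      apply Nat.eq_of_factorization_eq
      · have hle : q ≤ pvFF t m := Nat.le_of_dvd (pvFF_pos hm t) hdvd
        exact (Nat.div_pos hle hq.pos).ne'
      · exact (pvFF_pos hm (t + 1)).ne'
      · intro r
        rw [Nat.factorization_div hdvd, Finsupp.tsub_apply, hq.factorization,
          pvFF_factorization hm, pvFF_factorization hm, Finsupp.single_apply]
        by_cases hrq : q = r
        · subst hrq
          rw [if_pos rfl, pvLog_succ_of_pow hq.two_le hi he]
          omega
        · rw [if_neg hrq]
          by_cases hr0 : m.factorization r = 0
          · simp [hr0]
          · have hrprime : r.Prime := Nat.prime_of_mem_primeFactors (by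
              rw [← Nat.support_factorization]
              exact Finsupp.mem_support_iff.mpr hr0)
            rw [pvLog_succ_ne_base hrprime hq (fun h => hrq h.symm) hi he]
            omega
    · rw [if_neg (fun hc => hdvd (Nat.dvd_of_mod_eq_zero hc))]
      apply Finset.prod_congr rfl
      intro r hr
      have hrprime := Nat.prime_of_mem_primeFactors hr
      congr 1
      by_cases hrq : r = q
      · subst hrq
        have hnle : m.factorization r - Nat.log r t = 0 := by
          by_contra hc
          exact hdvd ((Nat.Prime.dvd_iff_one_le_factorization hrprime hFFne).mpr
            (by rw [pvFF_factorization hm]; omega))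
        rw [pvLog_succ_of_pow hrprime.two_le hi he]
        omega
      · rw [pvLog_succ_ne_base hrprime hq hrq hi he]
  · have hx : pvFF t (t + 1) = 1 := pvFF_not_pp (by omega) hpp
    rw [hx, if_pos (Nat.mod_one _), Nat.div_one]
    apply Finset.prod_congr rfl
    intro r hr
    rw [pvLog_succ_npp (Nat.prime_of_mem_primeFactors hr) hpp]

lemma pvMain (len t : Nat) (ht : 1 ≤ t) :
    pvLoopN ((List.range' (t + 1) len).map (pvFF t))
      = (List.range' (t + 1) len).map (fun m => pvFF (m - 1) m) := by
  induction len generalizing t with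
  | zero => simp [pvLoopN]
  | succ k ih =>
    rw [List.range'_succ, List.map_cons, List.map_cons, pvLoopN]
    have hstep : pvStepN (pvFF t (t + 1)) ((List.range' (t + 1 + 1) k).map (pvFF t))
        = (List.range' (t + 1 + 1) k).map (pvFF (t + 1)) := by
      rw [pvStepN, List.map_map]
      apply List.map_congr_left
      intro m hm
      have hm2 : t + 2 ≤ m := (List.mem_range'_1.mp hm).1
      exact pvStep_closed (by omega) ht
    rw [hstep, ih (t + 1) (by omega)]
    simp

def pvFindP_prop (m r : Nat) : Prop :=
  2 ≤ r ∧ (∀ d, 2 ≤ d → d < r → ¬ d ∣ m) ∧ (r * r ≤ m → r ∣ m)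

lemma pvFindP_spec (m : Nat) : ∀ k p, m + 1 - p = k → 2 ≤ p →
    (∀ d, 2 ≤ d → d < p → ¬ d ∣ m) → pvFindP_prop m (pvFindP m p) := by
  intro k
  induction k using Nat.strong_induction_on with
  | _ k ih =>
    intro p hk hp hinv
    rw [pvFindP]
    by_cases h : p * p ≤ m ∧ m % p ≠ 0
    · rw [if_pos h]
      have hpm : p ≤ m := by nlinarith [h.1]
      apply ih (m + 1 - (p + 1)) (by omega) (p + 1) rfl (by omega)
      intro d hd2 hdp hddvd
      by_cases hdp' : d < p
      · exact hinv d hd2 hdp' hddvd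
      · have : d = p := by omega
        subst this
        exact h.2 (Nat.mod_eq_zero_of_dvd hddvd)
    · rw [if_neg h]
      refine ⟨hp, hinv, fun hsq => ?_⟩
      by_cases hmod : m % p = 0
      · exact Nat.dvd_of_mod_eq_zero hmod
      · exact absurd ⟨hsq, hmod⟩ h

lemma pvP_eq_minFac {m : Nat} (hm : 2 ≤ m) :
    (if pvFindP m 2 * pvFindP m 2 > m then m else pvFindP m 2) = m.minFac := by
  obtain ⟨h2, hinv, hdv⟩ :=
    pvFindP_spec m (m + 1 - 2) 2 rfl le_rfl (fun d hd hd2 => absurd hd2 (by omega))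
  have hmfp : m.minFac.Prime := Nat.minFac_prime (by omega)
  have hmf2 : 2 ≤ m.minFac := hmfp.two_le
  have hmfd : m.minFac ∣ m := Nat.minFac_dvd m
  have hge : pvFindP m 2 ≤ m.minFac := by
    by_contra hc
    exact hinv _ hmf2 (by omega) hmfd
  by_cases hcase : pvFindP m 2 * pvFindP m 2 > m
  · rw [if_pos hcase]
    have hprime : m.Prime := by
      by_contra hnp
      have hsq := Nat.minFac_sq_le_self (by omega) hnp
      nlinarith [hge, hsq]
    exact (Nat.Prime.minFac_eq hprime).symm
  · rw [if_neg hcase]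
    have hrd : pvFindP m 2 ∣ m := hdv (by omega)
    have : m.minFac ≤ pvFindP m 2 := Nat.minFac_le_of_dvd h2 hrd
    omega

lemma pvStrip_spec (p : Nat) (hp : 2 ≤ p) :
    ∀ q, q ≠ 0 → ∃ i, q = p ^ i * pvStrip q p ∧ ¬ p ∣ pvStrip q p := by
  intro q
  induction q using Nat.strong_induction_on with
  | _ q ih =>
    intro hq
    rw [pvStrip]
    by_cases h : 2 ≤ p ∧ q ≠ 0 ∧ q % p = 0
    · rw [if_pos h]
      have hpd : p ∣ q := Nat.dvd_of_mod_eq_zero h.2.2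
      have hqp_ne : q / p ≠ 0 :=
        (Nat.div_pos (Nat.le_of_dvd (by omega) hpd) (by omega)).ne'
      obtain ⟨i, hi, hnd⟩ := ih (q / p) (Nat.div_lt_self (by omega) (by omega)) hqp_ne
      refine ⟨i + 1, ?_, hnd⟩
      calc q = p * (q / p) := (Nat.mul_div_cancel' hpd).symm
        _ = p * (p ^ i * pvStrip (q / p) p) := by rw [← hi]
        _ = p ^ (i + 1) * pvStrip (q / p) p := by ring
    · rw [if_neg h]
      refine ⟨0, by simp, fun hc => ?_⟩
      exact h ⟨hp, hq, Nat.mod_eq_zero_of_dvd hc⟩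

lemma pvElemB_eq {m : Nat} (hm : 2 ≤ m) : pvElemB m = pvFF (m - 1) m := by
  have hpeq := pvP_eq_minFac hm
  rw [pvElemB]
  rw [hpeq]
  have hprime : m.minFac.Prime := Nat.minFac_prime (by omega)
  obtain ⟨i, hi, hnd⟩ := pvStrip_spec m.minFac hprime.two_le m (by omega)
  by_cases hpp : IsPrimePow m
  · obtain ⟨q, k, hq, hk, he⟩ := (isPrimePow_nat_iff _).mp hpp
    have hqm : m.minFac = q := by
      rw [← he]
      exact Nat.Prime.pow_minFac hq (by omega)
    have hs1 : pvStrip m m.minFac = 1 := by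
      have hsd : pvStrip m m.minFac ∣ q ^ k := by
        have h0 : pvStrip m m.minFac ∣ m := Dvd.intro_left _ hi.symm
        rw [he]
        exact h0
      obtain ⟨j, hj, hjs⟩ := (Nat.dvd_prime_pow hq).mp hsd
      cases j with
      | zero => simpa using hjs
      | succ j' =>
        exfalso
        apply hnd
        rw [hjs, hqm, pow_succ]
        exact dvd_mul_left q _
    rw [if_pos hs1, hqm, ← he]
    exact (pvFF_pp hq hk).symm
  · have hs1 : pvStrip m m.minFac ≠ 1 := by
      intro hc
      rw [hc, mul_one] at hi
      have hiq : 0 < i := by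
        rcases Nat.eq_zero_or_pos i with h0 | h0
        · rw [h0, pow_zero] at hi; omega
        · exact h0
      exact hpp ((isPrimePow_nat_iff _).mpr ⟨m.minFac, i, hprime, hiq, hi.symm⟩)
    rw [if_neg hs1]
    exact (pvFF_not_pp hm hpp).symm

-- ===== VERDICT (by name: the statement is the Claim_ definition above) =====
theorem primeFactorsOfFactors_spec : Claim_equal_primeFactorsOfFactors := by
  intro n _
  show primeFactorsOfFactors n = primeFactorsOfFactors_alt n
  have hrange : PySem.List.pyRange 2 (n + 1) 1
      = (List.range' 2 ((n + 1 - 2).toNat)).map (fun m : Nat => (m : Int)) := by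
    rw [PySem.List.pyRange_one]
    simp only [List.range'_eq_map_range, List.map_map]
    apply List.map_congr_left
    intro k _
    simp only [Function.comp_apply]
    push_cast
    ring
  have hFF1 : (List.range' 2 ((n + 1 - 2).toNat)).map (pvFF 1)
      = List.range' 2 ((n + 1 - 2).toNat) := by
    conv_rhs => rw [← List.map_id (List.range' 2 ((n + 1 - 2).toNat))]
    apply List.map_congr_left
    intro m hm
    have hm2 : 2 ≤ m := (List.mem_range'_1.mp hm).1
    exact pvFF_one (by omega)
  have hA : pvLoopN (List.range' 2 ((n + 1 - 2).toNat))
      = (List.range' 2 ((n + 1 - 2).toNat)).map (fun m => pvFF (m - 1) m) := by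
    conv_lhs => rw [← hFF1]
    exact pvMain _ 1 le_rfl
  rw [primeFactorsOfFactors, primeFactorsOfFactors_alt, hrange, pvLoopA_natCast, hA,
    List.map_map, List.map_map]
  apply List.map_congr_left
  intro m hm
  have hm2 : 2 ≤ m := (List.mem_range'_1.mp hm).1
  simp only [Function.comp_apply, Int.toNat_natCast]
  exact congrArg _ (pvElemB_eq hm2).symm
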